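-- pv_equiv track=rewrite | github.com/road-to-koshien/kevin-leetcode-challenge | COURSERA/algo/course1/week5/assignment1.py | get_min_coin
-- ===== SOURCE A (Python) =====
-- def get_min_coin(coins):
--     nums_coin = [None] * (coins + 1)
--     nums_coin[0] = 0
--     list_coins = [1,3,4]
--     for i in range(1, coins+1):
--         nums_coin[i] = float('inf')
--         for coin in list_coins:
--             if i >= coin:
--                 temp = nums_coin[i-coin] + 1
--                 if temp < nums_coin[i]:
--                     nums_coin[i] = temp
--             else:
--                 break
--     return nums_coin[coins]
-- ===== SOURCE B (Python) =====
-- def get_min_coin(coins):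
--     # O(1) closed form: with denominations {1, 3, 4} the optimal count is
--     # (coins + 3) // 4, except coins == 2 which needs two coins (1 + 1).
--     if coins == 2:
--         return 2
--     return (coins + 3) // 4
-- ===== Notes on version B (the rewrite author's own statement) =====
-- stated objective: faster
-- what changed: Replaces the O(n) dynamic-programming table over denominations {1,3,4} with a closed-form periodic formula: (coins+3)//4, with the single exception coins==2 which needs two coins.
import Mathlib
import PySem

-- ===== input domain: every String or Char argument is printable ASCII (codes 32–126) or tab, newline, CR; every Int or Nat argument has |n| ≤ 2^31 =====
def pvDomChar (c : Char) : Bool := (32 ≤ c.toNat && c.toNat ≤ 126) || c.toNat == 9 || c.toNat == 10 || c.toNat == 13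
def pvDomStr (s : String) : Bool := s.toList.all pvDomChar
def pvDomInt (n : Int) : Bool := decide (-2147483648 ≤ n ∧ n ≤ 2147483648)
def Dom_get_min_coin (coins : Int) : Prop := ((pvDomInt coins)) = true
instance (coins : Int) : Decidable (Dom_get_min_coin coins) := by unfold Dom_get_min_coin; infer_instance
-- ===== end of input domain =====

-- B replaces A's O(n) DP table with the O(1) closed form (coins+3)//4 (special case coins==2).

-- ===== PORT A =====
-- inner 'for coin in list_coins' loop; cur = current nums_coin[i], 'none' renders the
-- float('inf') sentinel (any temp compares below it); 'break' returns cur.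
def pvInnerA (nums : List Int) (i : Int) : List Int → Option Int → Option Int
  | [], cur => cur
  | c :: rest, cur =>
    if i ≥ c then
      -- nums_coin[i-coin] + 1; on every reachable call 0 ≤ i-c < nums.length, so getD 0 is never hit
      let temp := (PySem.List.pyGet? nums (i - c)).getD 0 + 1
      let cur' := match cur with
        | none => some temp
        | some v => if temp < v then some temp else cur
      pvInnerA nums i rest cur'
    else cur

-- the table nums_coin after the i-loop has filled indices 0..n (cells beyond the filled
-- prefix are never read, so the growing list is the table)
def pvBuildA (coins : Nat) : List Int :=
  (List.range coins).foldl
    (fun (nums : List Int) (n : Nat) => nums ++ [(pvInnerA nums ((n : Int) + 1) [1, 3, 4] none).getD 0]) [0]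

def get_min_coin (coins : Int) : Int :=
  (PySem.List.pyGet? (pvBuildA coins.toNat) coins).getD 0

-- ===== PORT B =====
def get_min_coin_alt (coins : Int) : Int :=
  if coins = 2 then 2 else PySem.Int.floordiv (coins + 3) 4

-- ===== PRECONDITION & SPEC =====
-- A raises IndexError for coins < 0 ([None]*(coins+1) is too short for nums_coin[0] = 0).
def Pre_get_min_coin (coins : Int) : Prop := 0 ≤ coins
instance (coins : Int) : Decidable (Pre_get_min_coin coins) := by unfold Pre_get_min_coin; infer_instance
def pvWitness_get_min_coin : Int := 6
def Spec_get_min_coin (coins : Int) (out : Int) : Prop := out = get_min_coin_alt coins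
instance (coins : Int) (out : Int) : Decidable (Spec_get_min_coin coins out) := by unfold Spec_get_min_coin; infer_instance

-- ===== CLAIM (what is proved, stated in full; the proofs are below) =====
def Claim_equal_get_min_coin : Prop := ∀ (coins : Int), Dom_get_min_coin coins → Pre_get_min_coin coins → Spec_get_min_coin coins (get_min_coin coins)

-- ===== LEMMAS AND PROOFS =====

-- the closed form, as a function of the table index
def pvSpecF (k : Nat) : Int := if k = 2 then 2 else ((k + 3) / 4 : Nat)

lemma pvInner_eval (n : Nat) (hn : 3 ≤ n) :
    (pvInnerA ((List.range (n+1)).map pvSpecF) ((n : Int) + 1) [1, 3, 4] none).getD 0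
      = pvSpecF (n+1) := by
  have hg : ∀ k : Nat, k < n + 1 →
      PySem.List.pyGet? ((List.range (n+1)).map pvSpecF) ((k : Nat) : Int) = some (pvSpecF k) := by
    intro k hk
    simp [hk]
  have e1 : ((n : Int) + 1) - 1 = ((n : Nat) : Int) := by omega
  have e3 : ((n : Int) + 1) - 3 = (((n - 2 : Nat)) : Int) := by omega
  have e4 : ((n : Int) + 1) - 4 = (((n - 3 : Nat)) : Int) := by omega
  have c1 : ((n : Int) + 1) ≥ 1 := by omega
  have c3 : ((n : Int) + 1) ≥ 3 := by omega
  have c4 : ((n : Int) + 1) ≥ 4 := by omega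
  simp only [pvInnerA, if_pos c1, if_pos c3, if_pos c4, e1, e3, e4,
    hg n (by omega), hg (n - 2) (by omega), hg (n - 3) (by omega), Option.getD_some]
  rcases Nat.lt_or_ge n 6 with h6 | h6
  · interval_cases n <;> decide
  · have k1 : ¬ (n = 2) := by omega
    have k3 : ¬ (n - 2 = 2) := by omega
    have k4 : ¬ (n - 3 = 2) := by omega
    have k0 : ¬ (n + 1 = 2) := by omega
    simp only [pvSpecF, k1, k3, k4, k0, if_false]
    split_ifs <;> dsimp only <;> split_ifs <;> simp only [Option.getD_some] <;> omega

lemma pvBuildA_eq (n : Nat) : pvBuildA n = (List.range (n+1)).map pvSpecF := by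
  induction n with
  | zero => decide
  | succ n ih =>
    have hstep : pvBuildA (n+1)
        = pvBuildA n ++ [(pvInnerA (pvBuildA n) ((n : Int) + 1) [1, 3, 4] none).getD 0] := by
      simp only [pvBuildA, List.range_succ, List.foldl_append, List.foldl_cons, List.foldl_nil]
    rw [hstep, ih]
    have hr : (List.range (n+1+1)).map pvSpecF
        = (List.range (n+1)).map pvSpecF ++ [pvSpecF (n+1)] := by
      rw [List.range_succ, List.map_append]; rfl
    rw [hr]
    congr 1
    rcases Nat.lt_or_ge n 3 with h | h
    · interval_cases n <;> decide
    · rw [pvInner_eval n h]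

-- ===== VERDICT (by name: the statement is the Claim_ definition above) =====
theorem get_min_coin_spec : Claim_equal_get_min_coin := by
  intro coins _ hpre
  unfold Pre_get_min_coin at hpre
  obtain ⟨m, rfl⟩ := Int.eq_ofNat_of_zero_le hpre
  unfold Spec_get_min_coin get_min_coin get_min_coin_alt
  rw [Int.toNat_natCast, pvBuildA_eq]
  have hget : (PySem.List.pyGet? (List.map pvSpecF (List.range (m + 1))) ((m : Nat) : Int)).getD 0
      = pvSpecF m := by
    simp
  rw [hget]
  have hf : PySem.Int.floordiv (((m : Nat) : Int) + 3) 4 = (((m + 3) / 4 : Nat) : Int) := by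
    exact_mod_cast PySem.Int.floordiv_natCast (m + 3) 4
  rw [hf]
  by_cases h2 : m = 2
  · simp [pvSpecF, h2]
  · have h2' : ¬ (((m : Nat) : Int) = 2) := by omega
    simp [pvSpecF, h2, h2']
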